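-- pv_equiv track=rewrite | github.com/doors1118-sketch/busan-city-local-products | core_calc.py | extract_dminstt_codes
-- ===== SOURCE A (Python) =====
-- def extract_dminstt_codes(dminstt_list_str):
--     """dminsttList 필드에서 수요기관 코드 추출"""
--     codes = []
--     if not dminstt_list_str or dminstt_list_str in ('nan', 'None', ''):
--         return codes
--     for chunk in str(dminstt_list_str).split('[')[1:]:
--         chunk = chunk.split(']')[0]
--         parts = chunk.split('^')
--         if len(parts) >= 2:
--             codes.append(str(parts[1]).strip())
--     return codes
-- ===== SOURCE B (Python) =====
-- def extract_dminstt_codes(dminstt_list_str):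
--     """dminsttList 필드에서 수요기관 코드 추출 (single-pass character scanner)"""
--     if not dminstt_list_str or dminstt_list_str in ('nan', 'None', ''):
--         return []
--     # One pass: collect the text after each '[' up to the next '[' or ']' (or end).
--     segments = []
--     seg = None  # None = not currently inside a segment
--     for ch in str(dminstt_list_str):
--         if ch == '[':
--             if seg is not None:
--                 segments.append(seg)
--             seg = ''
--         elif seg is not None:
--             if ch == ']':
--                 segments.append(seg)
--                 seg = None
--             else:
--                 seg += ch
--     if seg is not None:
--         segments.append(seg)
--     codes = []
--     for seg in segments:
--         _, sep, rest = seg.partition('^')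
--         if sep:
--             codes.append(rest.partition('^')[0].strip())
--     return codes
-- ===== Notes on version B (the rewrite author's own statement) =====
-- stated objective: alternative
-- what changed: Replaces A's three chained split passes (on the opening bracket, then per chunk on the closing bracket and on the caret) by a single character scan that collects each bracket segment directly, followed by one str.partition per segment to pick out the code field.
import Mathlib
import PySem

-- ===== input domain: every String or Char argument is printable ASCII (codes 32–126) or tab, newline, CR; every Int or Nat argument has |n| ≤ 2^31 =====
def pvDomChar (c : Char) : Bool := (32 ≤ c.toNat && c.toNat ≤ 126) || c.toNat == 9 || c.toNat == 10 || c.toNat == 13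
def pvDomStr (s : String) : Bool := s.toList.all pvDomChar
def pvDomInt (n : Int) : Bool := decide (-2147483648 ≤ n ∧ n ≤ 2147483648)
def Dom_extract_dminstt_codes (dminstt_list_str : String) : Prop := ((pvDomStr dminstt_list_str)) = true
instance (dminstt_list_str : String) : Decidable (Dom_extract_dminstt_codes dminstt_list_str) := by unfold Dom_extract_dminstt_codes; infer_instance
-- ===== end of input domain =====

-- B replaces A's chained split('[') / split(']') / split('^') passes by a single character scan
-- that collects each bracket segment, then a partition on '^' per segment (objective: alternative).

-- ===== PORT A =====
-- literal transliteration of A: guard, then for each chunk of str(x).split('[')[1:]: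
-- chunk = chunk.split(']')[0]; parts = chunk.split('^'); if len(parts) >= 2: append(str(parts[1]).strip())
def extract_dminstt_codes (dminstt_list_str : String) : List String :=
  if dminstt_list_str = "" ∨ dminstt_list_str = "nan" ∨ dminstt_list_str = "None" then []
  else
    ((PySem.Chars.splitOn dminstt_list_str.toList ['[']).drop 1).foldl
      (fun codes chunk =>
        if (PySem.Chars.splitOn ((PySem.Chars.splitOn chunk [']'])[0]!) ['^']).length ≥ 2 then
          codes ++ [String.ofList (PySem.Chars.strip
            (PySem.Chars.splitOn ((PySem.Chars.splitOn chunk [']'])[0]!) ['^'])[1]!)]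
        else codes) []

-- ===== PORT B =====
-- Source B's scanner loop: seg = None outside a segment; '[' starts (and flushes) a segment,
-- ']' closes it, other chars extend it; a dangling segment is flushed at the end.
def pvScan : List Char → Option (List Char) → List (List Char)
  | [], none => []
  | [], some seg => [seg]
  | ch :: rest, none => if ch = '[' then pvScan rest (some []) else pvScan rest none
  | ch :: rest, some seg =>
      if ch = '[' then seg :: pvScan rest (some [])
      else if ch = ']' then seg :: pvScan rest none
      else pvScan rest (some (seg ++ [ch]))

-- seg.partition('^'): the part after the first '^' is dropWhile + tail; sep found ↔ dropWhile ≠ []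
def extract_dminstt_codes_alt (dminstt_list_str : String) : List String :=
  if dminstt_list_str = "" ∨ dminstt_list_str = "nan" ∨ dminstt_list_str = "None" then []
  else
    (pvScan dminstt_list_str.toList none).foldl
      (fun codes seg =>
        if seg.dropWhile (· ≠ '^') = [] then codes
        else codes ++ [String.ofList (PySem.Chars.strip
          ((seg.dropWhile (· ≠ '^')).tail.takeWhile (· ≠ '^')))]) []

-- ===== PRECONDITION & SPEC =====
def Spec_extract_dminstt_codes (dminstt_list_str : String) (out : List String) : Prop := out = extract_dminstt_codes_alt dminstt_list_str
instance (dminstt_list_str : String) (out : List String) : Decidable (Spec_extract_dminstt_codes dminstt_list_str out) := by unfold Spec_extract_dminstt_codes; infer_instance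

-- ===== CLAIM (what is proved, stated in full; the proofs are below) =====
def Claim_equal_extract_dminstt_codes : Prop := ∀ (dminstt_list_str : String), Dom_extract_dminstt_codes dminstt_list_str → Spec_extract_dminstt_codes dminstt_list_str (extract_dminstt_codes dminstt_list_str)

-- ===== LEMMAS AND PROOFS =====

-- structural form of Python's split on a ONE-CHARACTER separator, with the pending piece as accumulator
def pvSplitC (c : Char) : List Char → List Char → List (List Char)
  | [], cur => [cur.reverse]
  | x :: rest, cur =>
      if x = c then cur.reverse :: pvSplitC c rest []
      else pvSplitC c rest (x :: cur)

theorem pvSplitOn_go_eq (c : Char) (fuel : Nat) (l cur : List Char) (acc : List (List Char))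
    (hf : l.length < fuel) :
    PySem.Chars.splitOn.go [c] fuel l cur acc = acc.reverse ++ pvSplitC c l cur := by
  induction fuel generalizing l cur acc with
  | zero => omega
  | succ n ih =>
    cases l with
    | nil => simp [PySem.Chars.splitOn.go, pvSplitC]
    | cons x rest =>
      simp only [PySem.Chars.splitOn.go, pvSplitC, List.isPrefixOf]
      by_cases hx : c = x
      · subst hx
        simp only [List.length_cons] at hf
        simp only [if_true, List.length, List.drop]
        rw [ih rest [] (cur.reverse :: acc) (by omega)]
        simp
      · simp only [beq_eq_false_iff_ne.mpr hx]
        simp only [List.length_cons] at hf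
        rw [if_neg (by simp), ih rest (x :: cur) acc (by omega)]
        simp [Ne.symm hx]

theorem pvSplitOn_single (c : Char) (l : List Char) :
    PySem.Chars.splitOn l [c] = pvSplitC c l [] := by
  rw [PySem.Chars.splitOn, pvSplitOn_go_eq c (l.length + 1) l [] [] (by omega)]
  simp

theorem pvTakeWhile_of_not_mem (c : Char) (seg : List Char) (h : c ∉ seg) :
    seg.takeWhile (· ≠ c) = seg := by
  induction seg with
  | nil => rfl
  | cons a s ih =>
    simp only [List.mem_cons, not_or] at h
    rw [List.takeWhile_cons_of_pos (by simpa using Ne.symm h.1), ih h.2]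

theorem pvTakeWhile_stop (c : Char) (seg t : List Char) (h : c ∉ seg) :
    (seg ++ c :: t).takeWhile (· ≠ c) = seg := by
  induction seg with
  | nil => rw [List.nil_append, List.takeWhile_cons_of_neg (by simp)]
  | cons a s ih =>
    simp only [List.mem_cons, not_or] at h
    rw [List.cons_append, List.takeWhile_cons_of_pos (by simpa using Ne.symm h.1), ih h.2]

theorem pvSplitC_eq_cons (c : Char) (l cur : List Char) :
    pvSplitC c l cur =
      (cur.reverse ++ l.takeWhile (· ≠ c)) ::
        (if c ∈ l then pvSplitC c ((l.dropWhile (· ≠ c)).tail) [] else []) := by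
  induction l generalizing cur with
  | nil => simp [pvSplitC]
  | cons x rest ih =>
    by_cases hx : x = c
    · subst hx
      simp [pvSplitC, List.takeWhile, List.dropWhile]
    · rw [pvSplitC, if_neg hx, ih]
      simp [hx, Ne.symm, List.mem_cons]

-- the scanner computes exactly A's chunks-after-'[' each cut at the first ']'
theorem pvScan_splitC (cs : List Char) :
    (∀ cur, pvScan cs none =
      ((pvSplitC '[' cs cur).drop 1).map (fun ch => ch.takeWhile (· ≠ ']'))) ∧
    (∀ seg, ']' ∉ seg →
      pvScan cs (some seg) =
        (pvSplitC '[' cs seg.reverse).map (fun ch => ch.takeWhile (· ≠ ']'))) := by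
  induction cs with
  | nil =>
    refine ⟨fun cur => by simp [pvScan, pvSplitC], fun seg h => ?_⟩
    simp only [pvScan, pvSplitC, List.map_cons, List.map_nil, List.reverse_reverse]
    rw [pvTakeWhile_of_not_mem _ _ h]
  | cons x rest ih =>
    obtain ⟨ihn, ihs⟩ := ih
    constructor
    · intro cur
      by_cases hx : x = '['
      · subst hx
        rw [pvScan, if_pos rfl, pvSplitC, if_pos rfl]
        simpa using ihs [] (by simp)
      · rw [pvScan, if_neg hx, pvSplitC, if_neg hx, ihn (x :: cur)]
    · intro seg hseg
      by_cases hx : x = '['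
      · subst hx
        rw [pvScan, if_pos rfl, pvSplitC, if_pos rfl]
        simp only [List.map_cons, List.reverse_reverse]
        rw [ihs [] (by simp), pvTakeWhile_of_not_mem _ _ hseg, List.reverse_nil]
      · by_cases hy : x = ']'
        · subst hy
          rw [pvScan, if_neg (by decide), if_pos rfl, pvSplitC, if_neg (by decide)]
          rw [pvSplitC_eq_cons '[' rest (']' :: seg.reverse)]
          simp only [List.map_cons, List.reverse_cons, List.reverse_reverse]
          congr 1
          · rw [List.append_assoc]
            exact (pvTakeWhile_stop _ _ _ hseg).symm
          · rw [ihn [], pvSplitC_eq_cons '[' rest [], List.drop_succ_cons, List.drop_zero]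
        · rw [pvScan, if_neg hx, if_neg hy, pvSplitC, if_neg hx]
          rw [ihs (seg ++ [x]) (by simp [hseg, Ne.symm hy]), List.reverse_append]
          simp

-- per-chunk: A's split(']')[0] / split('^') pipeline equals B's partition on the scanned segment
theorem pvStep_eq (codes : List String) (ch : List Char) :
    (if (PySem.Chars.splitOn ((PySem.Chars.splitOn ch [']'])[0]!) ['^']).length ≥ 2 then
        codes ++ [String.ofList (PySem.Chars.strip
          (PySem.Chars.splitOn ((PySem.Chars.splitOn ch [']'])[0]!) ['^'])[1]!)]
      else codes)
    = (if (ch.takeWhile (· ≠ ']')).dropWhile (· ≠ '^') = [] then codes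
       else codes ++ [String.ofList (PySem.Chars.strip
         (((ch.takeWhile (· ≠ ']')).dropWhile (· ≠ '^')).tail.takeWhile (· ≠ '^')))]) := by
  rw [pvSplitOn_single ']' ch, pvSplitC_eq_cons ']' ch []]
  simp only [List.reverse_nil, List.nil_append, List.getElem!_cons_zero]
  rw [pvSplitOn_single '^' _, pvSplitC_eq_cons '^' _ []]
  simp only [List.reverse_nil, List.nil_append]
  by_cases hm : '^' ∈ ch.takeWhile (· ≠ ']')
  · rw [if_pos hm, pvSplitC_eq_cons '^' _ []]
    have hne : (ch.takeWhile (· ≠ ']')).dropWhile (· ≠ '^') ≠ [] := by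
      intro h
      have := (List.dropWhile_eq_nil_iff).mp h '^' hm
      simp at this
    rw [if_neg hne]
    simp only [List.length_cons, List.getElem!_cons_succ, List.getElem!_cons_zero,
      List.reverse_nil, List.nil_append]
    rw [if_pos (by omega)]
  · rw [if_neg hm]
    have hnil : (ch.takeWhile (· ≠ ']')).dropWhile (· ≠ '^') = [] := by
      rw [List.dropWhile_eq_nil_iff]
      intro x hx
      simp only [decide_eq_true_eq]
      intro h
      exact hm (h ▸ hx)
    rw [if_pos hnil, if_neg (by simp)]

-- ===== VERDICT (by name: the statement is the Claim_ definition above) =====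
theorem extract_dminstt_codes_spec : Claim_equal_extract_dminstt_codes := by
  intro s _
  show extract_dminstt_codes s = extract_dminstt_codes_alt s
  rw [extract_dminstt_codes, extract_dminstt_codes_alt]
  by_cases hg : s = "" ∨ s = "nan" ∨ s = "None"
  · rw [if_pos hg, if_pos hg]
  · rw [if_neg hg, if_neg hg, pvSplitOn_single, (pvScan_splitC s.toList).1 [], List.foldl_map]
    congr 1
    funext codes ch
    exact pvStep_eq codes ch
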